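-- pv_equiv track=rewrite | github.com/chandyego84/CptS355 | Labs/LabAssignment3/Lab3.py | getMonthlyCases
-- ===== SOURCE A (Python) =====
-- def getMonthlyCases(data):
--      newData = {}
--
--      for (county, monthsCases) in data.items():
--           for (month, case) in monthsCases.items():
--                if month not in newData:
--                     # initialize the dict value for that month
--                     newData[month] = {}
--                newData[month][county] = case
--
--      return newData
-- ===== SOURCE B (Python) =====
-- def getMonthlyCases(data):
--     # month-major gather: first collect the distinct months in first-appearance
--     # order, then for each month scan the counties that report it
--     months = dict.fromkeys(m for cases in data.values() for m in cases)
--     return {m: {county: cases[m] for county, cases in data.items() if m in cases}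
--             for m in months}
-- ===== Notes on version B (the rewrite author's own statement) =====
-- stated objective: alternative
-- what changed: Flips the traversal: instead of A's county-major single-pass scatter into a dict-of-dicts (membership test + nested mutation per entry), B first collects the distinct months in first-appearance order and then builds the result month-major, gathering for each month the counties that report it with a membership-guarded lookup.
import Mathlib
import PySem

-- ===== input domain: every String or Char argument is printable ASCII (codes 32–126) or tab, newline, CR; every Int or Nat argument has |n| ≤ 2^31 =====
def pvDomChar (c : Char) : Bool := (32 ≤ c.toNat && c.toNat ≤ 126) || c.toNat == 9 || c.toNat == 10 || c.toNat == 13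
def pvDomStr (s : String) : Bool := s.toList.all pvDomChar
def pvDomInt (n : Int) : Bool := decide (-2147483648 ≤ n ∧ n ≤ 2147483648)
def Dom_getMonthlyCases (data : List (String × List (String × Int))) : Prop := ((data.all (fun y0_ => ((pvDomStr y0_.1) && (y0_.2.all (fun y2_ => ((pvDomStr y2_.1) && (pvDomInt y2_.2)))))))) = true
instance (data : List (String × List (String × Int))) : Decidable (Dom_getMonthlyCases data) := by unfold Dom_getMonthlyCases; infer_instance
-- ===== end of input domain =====

-- ===== PORT A =====
-- B builds the result month-major (gather with a membership test) instead of A's county-major scatter;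
-- return values proved equal (no argument is mutated).
def getMonthlyCases (data : List (String × List (String × Int))) : List (String × List (String × Int)) :=
  -- newData = {}; for county, monthsCases in data.items(): for month, case in monthsCases.items(): ...
  let newData : PySem.Dict String (PySem.Dict String Int) :=
    data.foldl (fun nd p =>
      p.2.foldl (fun nd q =>
        -- if month not in newData: newData[month] = {}
        let nd := if nd.contains q.1 then nd else nd.insert q.1 PySem.Dict.empty
        -- newData[month][county] = case
        nd.modify q.1 PySem.Dict.empty (fun inner => inner.insert p.1 q.2)) nd)
      PySem.Dict.empty
  newData.items.map (fun r => (r.1, r.2.items))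

-- ===== PORT B =====
def getMonthlyCases_alt (data : List (String × List (String × Int))) : List (String × List (String × Int)) :=
  -- months = dict.fromkeys(m for cases in data.values() for m in cases)
  let months : List String := PySem.List.dedup (data.flatMap (fun c => c.2.map (fun q => q.1)))
  -- {m: {county: cases[m] for county, cases in data.items() if m in cases} for m in months}
  (months.foldl (fun out m =>
      out.insert m
        ((data.foldl (fun inner p =>
            match p.2.lookup m with          -- 'm in cases' guard + 'cases[m]' lookup
            | some v => inner.insert p.1 v
            | none => inner) (PySem.Dict.empty : PySem.Dict String Int)).items))
    (PySem.Dict.empty : PySem.Dict String (List (String × Int)))).items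

-- ===== PRECONDITION & SPEC =====
-- Pre_ requires the association lists to have unique keys (outer county keys, and the month keys of
-- each county): the Python arguments are dicts, so a list with duplicate keys does not encode any
-- Python input of A.
def Pre_getMonthlyCases (data : List (String × List (String × Int))) : Prop :=
  (data.map (fun p => p.1)).Nodup ∧ ∀ p ∈ data, (p.2.map (fun q => q.1)).Nodup
instance (data : List (String × List (String × Int))) : Decidable (Pre_getMonthlyCases data) := by
  unfold Pre_getMonthlyCases; infer_instance

def pvWitness_getMonthlyCases : (List (String × List (String × Int))) :=
  [("a", [("jan", 1), ("feb", 2)]), ("b", [("jan", 3)])]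

def Spec_getMonthlyCases (data : List (String × List (String × Int))) (out : List (String × List (String × Int))) : Prop := out = getMonthlyCases_alt data
instance (data : List (String × List (String × Int))) (out : List (String × List (String × Int))) : Decidable (Spec_getMonthlyCases data out) := by unfold Spec_getMonthlyCases; infer_instance

-- ===== CLAIM (what is proved, stated in full; the proofs are below) =====
def Claim_equal_getMonthlyCases : Prop := ∀ (data : List (String × List (String × Int))), Dom_getMonthlyCases data → Pre_getMonthlyCases data → Spec_getMonthlyCases data (getMonthlyCases data)

-- ===== LEMMAS AND PROOFS =====

-- A's "if absent, initialise; then mutate" collapses to a single Dict.modify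
lemma step_eq_modify (D : PySem.Dict String (PySem.Dict String Int)) (c : String) (q : String × Int) :
    (let nd := if D.contains q.1 then D else D.insert q.1 PySem.Dict.empty
     nd.modify q.1 PySem.Dict.empty (fun inner => inner.insert c q.2))
    = D.modify q.1 PySem.Dict.empty (fun inner => inner.insert c q.2) := by
  by_cases h : D.contains q.1
  · simp [h]
  · have hc : D.contains q.1 = false := by simpa using h
    simp [hc, PySem.Dict.modify, PySem.Dict.getD_insert_self, PySem.Dict.insert_insert_self,
      PySem.Dict.getD_of_not_contains (h := hc)]

-- A's nested loops over data are one loop over the (county, (month, case)) triples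
lemma fold_flatten {σ : Type} (g : σ → String → (String × Int) → σ)
    (data : List (String × List (String × Int))) (s : σ) :
    data.foldl (fun s p => p.2.foldl (fun s q => g s p.1 q) s) s
    = (data.flatMap (fun p => p.2.map (fun q => (p.1, q)))).foldl (fun s t => g s t.1 t.2) s := by
  induction data generalizing s with
  | nil => rfl
  | cons p rest ih =>
    simp only [List.foldl_cons, List.flatMap_cons, List.foldl_append, List.foldl_map, ih]

-- per-month content of A's accumulated dict
lemma getD_fold (l : List (String × (String × Int))) (D : PySem.Dict String (PySem.Dict String Int))
    (m : String) :
    ((l.foldl (fun nd t => nd.modify t.2.1 PySem.Dict.empty (fun inner => inner.insert t.1 t.2.2)) D).getD m PySem.Dict.empty)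
    = (l.filter (fun t => t.2.1 == m)).foldl (fun inner t => inner.insert t.1 t.2.2)
        (D.getD m PySem.Dict.empty) := by
  induction l generalizing D with
  | nil => rfl
  | cons t rest ih =>
    simp only [List.foldl_cons, List.filter_cons, ih, PySem.Dict.getD_modify]
    by_cases h : t.2.1 = m
    · simp [h]
    · simp [h, Ne.symm h, beq_iff_eq]

-- with unique month keys, filtering a row for month m is its (first-match) lookup
lemma filter_eq_lookup (l : List (String × Int)) (m : String)
    (h : (l.map (fun q => q.1)).Nodup) :
    l.filter (fun q => q.1 == m) = ((l.lookup m).map (fun v => (m, v))).toList := by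
  induction l with
  | nil => rfl
  | cons q rest ih =>
    obtain ⟨k, v⟩ := q
    simp only [List.map_cons, List.nodup_cons] at h
    by_cases hq : k = m
    · subst hq
      have : rest.filter (fun r => r.1 == k) = [] := by
        rw [List.filter_eq_nil_iff]
        intro r hr
        simp only [beq_iff_eq]
        exact fun he => h.1 (he ▸ List.mem_map_of_mem hr)
      simp [List.filter_cons, List.lookup_cons, this]
    · have hm : (m == k) = false := by simpa [beq_iff_eq] using Ne.symm hq
      simp [List.filter_cons, List.lookup_cons, beq_iff_eq, hq, hm, ih h.2]

-- the triples with month m, rewritten county by county through the first-match lookup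
lemma filter_triples (data : List (String × List (String × Int))) (m : String)
    (h2 : ∀ p ∈ data, (p.2.map (fun q => q.1)).Nodup) :
    (data.flatMap (fun p => p.2.map (fun q => (p.1, q)))).filter (fun t => t.2.1 == m)
    = data.flatMap (fun p => ((p.2.lookup m).map (fun v => (p.1, (m, v)))).toList) := by
  induction data with
  | nil => rfl
  | cons p rest ih =>
    simp only [List.flatMap_cons, List.filter_append]
    rw [List.filter_map]
    have hp := filter_eq_lookup p.2 m (h2 p (List.mem_cons_self))
    have : (fun (t : String × String × Int) => t.2.1 == m) ∘ (fun q => (p.1, q))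
        = fun (q : String × Int) => q.1 == m := rfl
    rw [this, hp, ih (fun r hr => h2 r (List.mem_cons_of_mem _ hr))]
    cases p.2.lookup m <;> simp

-- the county column of a month row is a filtered county list
lemma row_fst_sublist (data : List (String × List (String × Int))) (m : String) :
    (data.flatMap (fun p => ((p.2.lookup m).map (fun v => (p.1, (m, v)))).toList)).map
        (fun t => t.1)
    = (data.filter (fun p => (p.2.lookup m).isSome)).map (fun p => p.1) := by
  induction data with
  | nil => rfl
  | cons p rest ih =>
    cases h : p.2.lookup m <;> simp [List.filter_cons, h, ih]

lemma row_pairs (data : List (String × List (String × Int))) (m : String) :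
    (data.flatMap (fun p => ((p.2.lookup m).map (fun v => (p.1, (m, v)))).toList)).map
        (fun t => (t.1, t.2.2))
    = data.filterMap (fun c => (c.2.lookup m).map (fun v => (c.1, v))) := by
  induction data with
  | nil => rfl
  | cons p rest ih =>
    cases h : p.2.lookup m <;> simp [List.filterMap_cons, h, ih]

-- county column of a month row is Nodup under Pre_
lemma row_fst_nodup (data : List (String × List (String × Int))) (m : String)
    (h1 : (data.map (fun p => p.1)).Nodup) :
    ((data.flatMap (fun p => ((p.2.lookup m).map (fun v => (p.1, (m, v)))).toList)).map
        (fun t => t.1)).Nodup := by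
  rw [row_fst_sublist]
  exact ((List.filter_sublist (l := data)).map (fun p => p.1)).nodup h1

-- both sides' per-month row, as a filterMap over the counties
lemma row_common (data : List (String × List (String × Int))) (m : String)
    (h2 : ∀ p ∈ data, (p.2.map (fun q => q.1)).Nodup) :
    ((data.flatMap (fun p => p.2.map (fun q => (p.1, q)))).filter (fun t => t.2.1 == m)).map
        (fun t => (t.1, t.2.2))
    = data.filterMap (fun c => (c.2.lookup m).map (fun v => (c.1, v))) := by
  rw [filter_triples data m h2, row_pairs]

-- B's guarded gather loop is a plain insert loop over the filterMap of the counties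
lemma innerB_eq_foldl (data : List (String × List (String × Int))) (m : String)
    (d : PySem.Dict String Int) :
    data.foldl (fun inner p =>
        match p.2.lookup m with
        | some v => inner.insert p.1 v
        | none => inner) d
    = (data.filterMap (fun c => (c.2.lookup m).map (fun v => (c.1, v)))).foldl
        (fun inner q => inner.insert q.1 q.2) d := by
  induction data generalizing d with
  | nil => rfl
  | cons p rest ih =>
    cases h : p.2.lookup m <;> simp [List.filterMap_cons, h, ih]

-- the filterMap's county column, under Pre_, is Nodup
lemma filterMap_fst_nodup (data : List (String × List (String × Int))) (m : String)
    (h1 : (data.map (fun p => p.1)).Nodup) :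
    ((data.filterMap (fun c => (c.2.lookup m).map (fun v => (c.1, v)))).map
        (fun q => q.1)).Nodup := by
  rw [← row_pairs, List.map_map]
  exact row_fst_nodup data m h1

-- ===== VERDICT (by name: the statement is the Claim_ definition above) =====
theorem getMonthlyCases_spec : Claim_equal_getMonthlyCases := by
  intro data _ hpre
  unfold Spec_getMonthlyCases getMonthlyCases getMonthlyCases_alt
  have h1 : ∀ (c : String),
      (fun (nd : PySem.Dict String (PySem.Dict String Int)) (q : String × Int) =>
        let nd := if nd.contains q.1 then nd else nd.insert q.1 PySem.Dict.empty
        nd.modify q.1 PySem.Dict.empty (fun inner => inner.insert c q.2))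
      = (fun nd q => nd.modify q.1 PySem.Dict.empty (fun inner => inner.insert c q.2)) :=
    fun c => funext fun nd => funext fun q => step_eq_modify nd c q
  simp only [h1]
  have hAflat :
      data.foldl (fun nd p => p.2.foldl
          (fun nd q => nd.modify q.1 PySem.Dict.empty (fun inner => inner.insert p.1 q.2)) nd)
        PySem.Dict.empty
      = (data.flatMap (fun p => p.2.map (fun q => (p.1, q)))).foldl
          (fun nd t => nd.modify t.2.1 PySem.Dict.empty (fun inner => inner.insert t.1 t.2.2))
          PySem.Dict.empty :=
    fold_flatten (fun nd c q => nd.modify q.1 PySem.Dict.empty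
      (fun inner => inner.insert c q.2)) data PySem.Dict.empty
  rw [hAflat]
  -- B's inner dict per month: its items are exactly the filterMap row
  have hinner : ∀ m, (data.foldl (fun inner p =>
        match p.2.lookup m with
        | some v => inner.insert p.1 v
        | none => inner) (PySem.Dict.empty : PySem.Dict String Int)).items
      = data.filterMap (fun c => (c.2.lookup m).map (fun v => (c.1, v))) := by
    intro m
    rw [innerB_eq_foldl]
    have := PySem.Dict.items_foldl_insert_fresh
      (data.filterMap (fun c => (c.2.lookup m).map (fun v => (c.1, v))))
      (fun q => q.1) (fun q => q.2) (PySem.Dict.empty : PySem.Dict String Int)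
      (fun a _ => PySem.Dict.contains_empty (ν := Int) a.1)
      (filterMap_fst_nodup data m hpre.1)
    simpa using this
  simp only [hinner]
  -- B's outer dict: a fresh-key insert loop over the deduplicated months
  have houter := PySem.Dict.items_foldl_insert_fresh
      (PySem.List.dedup (data.flatMap (fun c => c.2.map (fun q => q.1))))
      (fun m => m)
      (fun m => data.filterMap (fun c => (c.2.lookup m).map (fun v => (c.1, v))))
      (PySem.Dict.empty : PySem.Dict String (List (String × Int)))
      (fun a _ => PySem.Dict.contains_empty a)
      (by simpa using PySem.List.nodup_dedup (data.flatMap (fun c => c.2.map (fun q => q.1))))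
  rw [houter]
  have hie : (PySem.Dict.empty : PySem.Dict String (List (String × Int))).items = [] := rfl
  rw [hie, List.nil_append, PySem.List.dedup_eq_ofList]
  -- A's keys are the distinct months in first-appearance order
  have hmap : (data.flatMap (fun p => p.2.map (fun q => (p.1, q)))).map (fun t => t.2.1)
      = data.flatMap (fun c => c.2.map (fun q => q.1)) := by
    simp only [List.map_flatMap, List.map_map]; rfl
  have hkF : ((data.flatMap (fun p => p.2.map (fun q => (p.1, q)))).foldl
        (fun nd t => nd.modify t.2.1 PySem.Dict.empty (fun inner => inner.insert t.1 t.2.2))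
        (PySem.Dict.empty : PySem.Dict String (PySem.Dict String Int))).keys
      = PySem.Set.ofList (data.flatMap (fun c => c.2.map (fun q => q.1))) := by
    refine (PySem.Dict.keys_foldl_modify_key
      (data.flatMap (fun p => p.2.map (fun q => (p.1, q))))
      (fun t => t.2.1) PySem.Dict.empty
      (fun (_ : PySem.Dict String (PySem.Dict String Int)) (t : String × String × Int)
        (inner : PySem.Dict String Int) => inner.insert t.1 t.2.2)
      PySem.Dict.empty).trans ?_
    rw [PySem.Dict.keys_empty, hmap]
    rfl
  have hndF : ((data.flatMap (fun p => p.2.map (fun q => (p.1, q)))).foldl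
        (fun nd t => nd.modify t.2.1 PySem.Dict.empty (fun inner => inner.insert t.1 t.2.2))
        (PySem.Dict.empty : PySem.Dict String (PySem.Dict String Int))).keys.Nodup := by
    rw [hkF]; exact PySem.Set.nodup_ofList _
  rw [PySem.Dict.items_eq_map_keys _ hndF PySem.Dict.empty, hkF, List.map_map]
  -- remaining: per month, A's row dict items = the filterMap row
  refine List.map_congr_left (fun m _ => ?_)
  simp only [Function.comp]
  congr 1
  rw [getD_fold, PySem.Dict.getD_empty, ← row_common data m hpre.2,
    filter_triples data m hpre.2]
  have := PySem.Dict.items_foldl_insert_fresh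
    (data.flatMap (fun p => ((p.2.lookup m).map (fun v => (p.1, (m, v)))).toList))
    (fun t => t.1) (fun t => t.2.2) PySem.Dict.empty
    (fun a _ => PySem.Dict.contains_empty (ν := Int) a.1)
    (row_fst_nodup data m hpre.1)
  simpa [row_pairs] using this
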